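-- pv_equiv track=rewrite | github.com/Sardorbek-Yuldashov/python-dasturlar | bunyod.py | map_divisors_count
-- ===== SOURCE A (Python) =====
-- def map_divisors_count(mp):
--     def s(x):
--         y = 0
--         if x == 1:
--             return 1
--         if x <= 0:
--             return 0
--         for i in range(1, x + 1):
--             if x % i == 0:
--                 y += 1
--         return y
--
--     return map(s, mp)
-- ===== SOURCE B (Python) =====
-- def map_divisors_count(mp):
--     def s(x):
--         if x <= 0:
--             return 0
--         c = 0
--         i = 1
--         while i * i <= x:
--             if x % i == 0:
--                 c += 1 if i * i == x else 2
--             i += 1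
--         return c
--     return map(s, mp)
-- ===== Notes on version B (the rewrite author's own statement) =====
-- stated objective: faster
-- what changed: Per element, B counts divisors by trial division only up to sqrt(x), adding 2 for each divisor pair (1 when i*i = x), instead of A's scan over all i in 1..x.
import Mathlib
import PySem

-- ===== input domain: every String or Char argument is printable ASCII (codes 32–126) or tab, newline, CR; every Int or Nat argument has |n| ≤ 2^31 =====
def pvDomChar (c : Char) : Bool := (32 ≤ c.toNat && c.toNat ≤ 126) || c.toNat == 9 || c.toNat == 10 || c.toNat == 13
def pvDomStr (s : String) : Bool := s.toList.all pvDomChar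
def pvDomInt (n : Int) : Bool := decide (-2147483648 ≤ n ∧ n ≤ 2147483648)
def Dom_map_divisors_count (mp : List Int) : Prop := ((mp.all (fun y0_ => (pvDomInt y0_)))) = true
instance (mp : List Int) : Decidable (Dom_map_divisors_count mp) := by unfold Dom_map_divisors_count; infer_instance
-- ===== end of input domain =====

-- B counts divisors of each x by trial division up to sqrt(x), counting divisor pairs, instead of A's full scan over 1..x (objective: faster).


-- ===== PORT A =====
-- inner helper s(x): early returns for x == 1 and x <= 0, then a full scan i = 1..x counting i with x % i == 0
def pvS (x : Int) : Int :=
  if x = 1 then 1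
  else if x ≤ 0 then 0
  else (PySem.List.pyRange 1 (x + 1) 1).foldl
        (fun y i => if PySem.Int.mod x i = 0 then y + 1 else y) 0

def map_divisors_count (mp : List Int) : List Int := mp.map pvS

-- ===== PORT B =====
-- termination helper for B's while loop: i*i ≤ x forces i ≤ x
theorem pvAltLoop_le {x i : Int} (h : i * i ≤ x) : i ≤ x := by
  have h1 : 0 ≤ (i - 1) * (i - 1) := mul_self_nonneg _
  have h2 : 0 ≤ i * i := mul_self_nonneg _
  nlinarith

-- while i*i <= x: if x % i == 0: c += 1 if i*i == x else 2; i += 1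
def pvAltLoop (x i c : Int) : Int :=
  if h : i * i ≤ x then
    pvAltLoop x (i + 1) (if PySem.Int.mod x i = 0 then c + (if i * i = x then 1 else 2) else c)
  else c
termination_by (x + 1 - i).toNat
decreasing_by
  have := pvAltLoop_le h
  omega

-- inner helper s(x) of B: 0 for x <= 0, otherwise run the pair-counting loop from i = 1
def pvSAlt (x : Int) : Int := if x ≤ 0 then 0 else pvAltLoop x 1 0

def map_divisors_count_alt (mp : List Int) : List Int := mp.map pvSAlt

-- ===== PRECONDITION & SPEC =====
def Spec_map_divisors_count (mp : List Int) (out : List Int) : Prop := out = map_divisors_count_alt mp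
instance (mp : List Int) (out : List Int) : Decidable (Spec_map_divisors_count mp out) := by unfold Spec_map_divisors_count; infer_instance

-- ===== CLAIM (what is proved, stated in full; the proofs are below) =====
def Claim_equal_map_divisors_count : Prop := ∀ (mp : List Int), Dom_map_divisors_count mp → Spec_map_divisors_count mp (map_divisors_count mp)

-- ===== LEMMAS AND PROOFS =====

-- `Nat.sqrt x.toNat` is the integer square-root threshold: i ≤ √x ↔ i² ≤ x
theorem le_sqrt_int {x i : Int} (hx : 0 < x) (hi : 0 ≤ i) :
    i ≤ (Nat.sqrt x.toNat : Int) ↔ i * i ≤ x := by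
  have hx' : ((x.toNat : Int)) = x := Int.toNat_of_nonneg (by omega)
  have hi' : ((i.toNat : Int)) = i := Int.toNat_of_nonneg hi
  rw [← hi', ← hx']
  constructor
  · intro h
    have h1 : i.toNat ≤ Nat.sqrt x.toNat := by exact_mod_cast h
    rw [Nat.le_sqrt'] at h1
    have : i.toNat * i.toNat ≤ x.toNat := by nlinarith [h1]
    exact_mod_cast this
  · intro h
    have h1 : i.toNat * i.toNat ≤ x.toNat := by exact_mod_cast h
    have : i.toNat ≤ Nat.sqrt x.toNat := by rw [Nat.le_sqrt']; nlinarith [h1]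
    exact_mod_cast this

-- the cofactor x / j of a positive divisor j of x: exactness, bounds, divisibility, involution
theorem pvDivFacts {x j : Int} (hx : 1 ≤ x) (h1 : 1 ≤ j) (hd : j ∣ x) :
    (x / j) * j = x ∧ 1 ≤ x / j ∧ (x / j) ∣ x ∧ x / (x / j) = j := by
  obtain ⟨k, hk⟩ := hd
  have hj0 : j ≠ 0 := by omega
  have hdiv : x / j = k := by rw [hk, Int.mul_ediv_cancel_left _ hj0]
  have hk1 : 1 ≤ k := by nlinarith
  refine ⟨Int.ediv_mul_cancel ⟨k, hk⟩, by rw [hdiv]; exact hk1, ⟨j, by rw [hdiv, hk]; ring⟩, ?_⟩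
  rw [hdiv, hk, mul_comm j k, Int.mul_ediv_cancel_left _ (by omega : k ≠ 0)]

-- B's loop computes the sum of pair-counts over i ≤ √x
theorem pvAltLoop_eq (x : Int) (hx : 0 < x) :
    ∀ (i c : Int), 1 ≤ i →
      pvAltLoop x i c
        = c + ∑ j ∈ Finset.Icc i ((Nat.sqrt x.toNat : Int)),
            (if j ∣ x then (if j * j = x then (1 : Int) else 2) else 0) := by
  intro i c h1
  generalize hn : (x + 1 - i).toNat = n
  induction n using Nat.strong_induction_on generalizing i c with
  | _ n IH =>
    rw [pvAltLoop]
    by_cases h : i * i ≤ x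
    · rw [dif_pos h]
      have hle : i ≤ (Nat.sqrt x.toNat : Int) := (le_sqrt_int hx (by omega)).mpr h
      have hix : i ≤ x := pvAltLoop_le h
      rw [IH (x + 1 - (i + 1)).toNat (by omega) (i + 1) _ (by omega) rfl]
      have hsplit : Finset.Icc i ((Nat.sqrt x.toNat : Int))
          = insert i (Finset.Icc (i + 1) ((Nat.sqrt x.toNat : Int))) := by
        ext a; simp only [Finset.mem_Icc, Finset.mem_insert]; omega
      rw [hsplit, Finset.sum_insert (by simp only [Finset.mem_Icc]; omega)]
      have hmod : PySem.Int.mod x i = 0 ↔ i ∣ x := PySem.Int.mod_eq_zero_iff_dvd x i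
      by_cases hd : i ∣ x
      · rw [if_pos (hmod.mpr hd), if_pos hd]; ring
      · rw [if_neg (fun hc => hd (hmod.mp hc)), if_neg hd]; ring
    · rw [dif_neg h]
      have : ¬ i ≤ (Nat.sqrt x.toNat : Int) := fun hc => h ((le_sqrt_int hx (by omega)).mp hc)
      rw [Finset.Icc_eq_empty this, Finset.sum_empty, add_zero]

-- the sqrt-pairing identity: #divisors of x in [1,x] = Σ_{1 ≤ j ≤ √x, j ∣ x} (2, or 1 when j² = x)
theorem core_pairing (x : Int) (hx : 1 ≤ x) :
    (((Finset.Icc 1 x).filter (fun i => i ∣ x)).card : Int)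
      = ∑ j ∈ Finset.Icc 1 ((Nat.sqrt x.toNat : Int)),
          (if j ∣ x then (if j * j = x then (1 : Int) else 2) else 0) := by
  set r : Int := (Nat.sqrt x.toNat : Int) with hr
  have hr0 : 0 ≤ r := by positivity
  have hrx : r ≤ x := by
    have h1 : Nat.sqrt x.toNat ≤ x.toNat := Nat.sqrt_le_self _
    have h2 : ((x.toNat : Int)) = x := Int.toNat_of_nonneg (by omega)
    omega
  have hiff : ∀ j : Int, 0 ≤ j → (j ≤ r ↔ j * j ≤ x) := fun j hj => le_sqrt_int (by omega) hj
  rw [← Finset.sum_filter]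
  set S := (Finset.Icc 1 r).filter (fun j => j ∣ x) with hS
  set D := (Finset.Icc 1 x).filter (fun i => i ∣ x) with hD
  have hsum : ∑ j ∈ S, (if j * j = x then (1:Int) else 2)
      = (S.card : Int) + ((S.filter (fun j => ¬ j * j = x)).card : Int) := by
    have hc : ∀ j ∈ S, (if j * j = x then (1:Int) else 2) = 1 + (if ¬ j * j = x then 1 else 0) := by
      intro j _; by_cases hj : j * j = x <;> simp [hj]
    rw [Finset.sum_congr rfl hc, Finset.sum_add_distrib, Finset.sum_boole]
    simp
  have hsplit : D.card = (D.filter (fun i => i ≤ r)).card + (D.filter (fun i => ¬ i ≤ r)).card :=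
    (Finset.card_filter_add_card_filter_not _).symm
  have hSeq : D.filter (fun i => i ≤ r) = S := by
    ext a
    simp only [hD, hS, Finset.mem_filter, Finset.mem_Icc]
    constructor
    · rintro ⟨⟨⟨ha1, _⟩, ha3⟩, ha4⟩; exact ⟨⟨ha1, ha4⟩, ha3⟩
    · rintro ⟨⟨ha1, ha4⟩, ha3⟩; exact ⟨⟨⟨ha1, le_trans ha4 hrx⟩, ha3⟩, ha4⟩
  have hbij : (D.filter (fun i => ¬ i ≤ r)).card = (S.filter (fun j => ¬ j * j = x)).card := by
    apply Finset.card_bij' (fun j _ => x / j) (fun k _ => x / k)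
    · intro a ha
      simp only [hD, Finset.mem_filter, Finset.mem_Icc] at ha
      obtain ⟨⟨⟨ha1, ha2⟩, ha3⟩, ha4⟩ := ha
      obtain ⟨he, hq1, hqd, hinv⟩ := pvDivFacts hx ha1 ha3
      have hgt : x < a * a := by
        by_contra hc; exact ha4 ((hiff a (by omega)).mpr (by omega))
      have hlt : (x / a) * (x / a) < x := by nlinarith [he, hgt, hq1, ha1]
      simp only [hS, Finset.mem_filter, Finset.mem_Icc]
      exact ⟨⟨⟨hq1, (hiff _ (by omega)).mpr (by omega)⟩, hqd⟩, by omega⟩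
    · intro a ha
      simp only [hS, Finset.mem_filter, Finset.mem_Icc] at ha
      obtain ⟨⟨⟨ha1, ha2⟩, ha3⟩, ha4⟩ := ha
      obtain ⟨he, hq1, hqd, hinv⟩ := pvDivFacts hx ha1 ha3
      have hlt : a * a < x := by
        have := (hiff a (by omega)).mp ha2
        omega
      have hgt : x < (x / a) * (x / a) := by nlinarith [he, hlt, hq1, ha1]
      simp only [hD, Finset.mem_filter, Finset.mem_Icc]
      refine ⟨⟨⟨hq1, ?_⟩, hqd⟩, fun hc => ?_⟩
      · nlinarith [he, ha1, hq1]
      · have := (hiff _ (by omega)).mp hc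
        omega
    · intro a ha
      simp only [hD, Finset.mem_filter, Finset.mem_Icc] at ha
      exact (pvDivFacts hx ha.1.1.1 ha.1.2).2.2.2
    · intro a ha
      simp only [hS, Finset.mem_filter, Finset.mem_Icc] at ha
      exact (pvDivFacts hx ha.1.1.1 ha.1.2).2.2.2
  rw [hsum, ← hbij, ← hSeq, hsplit]
  push_cast
  ring

-- A's counting loop over 1..x is the cardinality of the divisor set
theorem pvS_count (x : Int) :
    (PySem.List.pyRange 1 (x + 1) 1).foldl
        (fun y i => if PySem.Int.mod x i = 0 then y + 1 else y) 0
      = (((Finset.Icc 1 x).filter (fun i => i ∣ x)).card : Int) := by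
  refine (PySem.List.foldl_ite_add_one (fun i => PySem.Int.mod x i = 0)
        (PySem.List.pyRange 1 (x + 1) 1) 0).trans ?_
  rw [zero_add]
  have hcong : (PySem.List.pyRange 1 (x + 1) 1).countP (fun i => decide (PySem.Int.mod x i = 0))
      = (PySem.List.pyRange 1 (x + 1) 1).countP (fun i => decide (i ∣ x)) := by
    apply List.countP_congr
    intro a _
    simp only [decide_eq_true_eq]
    exact PySem.Int.mod_eq_zero_iff_dvd x a
  rw [hcong, List.countP_eq_length_filter]
  have hnd : (PySem.List.pyRange 1 (x + 1) 1).Nodup := PySem.List.nodup_pyRange_one 1 (x + 1)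
  rw [(List.toFinset_card_of_nodup (hnd.filter _)).symm, List.toFinset_filter]
  have hIcc : (PySem.List.pyRange 1 (x + 1) 1).toFinset = Finset.Icc 1 x := by
    ext a
    simp only [List.mem_toFinset, PySem.List.mem_pyRange_one, Finset.mem_Icc]
    omega
  rw [hIcc]
  congr 1
  simp

-- the two inner helpers agree on every integer
theorem pvS_eq_pvSAlt (x : Int) : pvS x = pvSAlt x := by
  by_cases hx0 : x ≤ 0
  · rw [pvS, pvSAlt, if_neg (by omega : ¬ x = 1), if_pos hx0, if_pos hx0]
  · have hx : 1 ≤ x := by omega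
    rw [pvSAlt, if_neg (by omega), pvAltLoop_eq x (by omega) 1 0 le_rfl, zero_add]
    by_cases h1 : x = 1
    · subst h1
      rw [pvS, if_pos rfl]
      norm_num [show ((Nat.sqrt (Int.toNat 1) : Int)) = 1 from rfl, Finset.Icc_self,
        Finset.sum_singleton]
    · rw [pvS, if_neg h1, if_neg (by omega), pvS_count x]
      exact core_pairing x hx

-- ===== VERDICT (by name: the statement is the Claim_ definition above) =====
theorem map_divisors_count_spec : Claim_equal_map_divisors_count := by
  intro mp _
  unfold Spec_map_divisors_count map_divisors_count map_divisors_count_alt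
  exact List.map_congr_left (fun x _ => pvS_eq_pvSAlt x)
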